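-- pv_equiv track=rewrite | github.com/hewzhew/sts-sim | tools/learning/batch_combat_abstraction_lab.py | group_ranks
-- ===== SOURCE A (Python) =====
-- from typing import Any
--
-- def group_ranks(report: dict[str, Any]) -> dict[str, int]:
--     best_by_signature: dict[str, int] = {}
--     for row in report.get("ranking") or []:
--         signature = str(row.get("equivalence_signature") or "")
--         rank = int(row.get("rank") or 0)
--         if signature and (signature not in best_by_signature or rank < best_by_signature[signature]):
--             best_by_signature[signature] = rank
--     return best_by_signature
-- ===== SOURCE B (Python) =====
-- from typing import Any
--
-- def group_ranks(report: dict[str, Any]) -> dict[str, int]: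
--     parsed = [(str(row.get("equivalence_signature") or ""), int(row.get("rank") or 0))
--               for row in (report.get("ranking") or [])]
--     groups: dict[str, list[int]] = {}
--     for signature, rank in parsed:
--         if signature:
--             groups.setdefault(signature, []).append(rank)
--     return {signature: min(ranks) for signature, ranks in groups.items()}
-- ===== Notes on version B (the rewrite author's own statement) =====
-- stated objective: alternative
-- what changed: B parses all rows up front, builds a dict of all-ranks-per-signature in one grouping pass, and then reduces each bucket with min in a final dict comprehension, instead of A's single pass keeping a running minimum per signature.
import Mathlib
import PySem

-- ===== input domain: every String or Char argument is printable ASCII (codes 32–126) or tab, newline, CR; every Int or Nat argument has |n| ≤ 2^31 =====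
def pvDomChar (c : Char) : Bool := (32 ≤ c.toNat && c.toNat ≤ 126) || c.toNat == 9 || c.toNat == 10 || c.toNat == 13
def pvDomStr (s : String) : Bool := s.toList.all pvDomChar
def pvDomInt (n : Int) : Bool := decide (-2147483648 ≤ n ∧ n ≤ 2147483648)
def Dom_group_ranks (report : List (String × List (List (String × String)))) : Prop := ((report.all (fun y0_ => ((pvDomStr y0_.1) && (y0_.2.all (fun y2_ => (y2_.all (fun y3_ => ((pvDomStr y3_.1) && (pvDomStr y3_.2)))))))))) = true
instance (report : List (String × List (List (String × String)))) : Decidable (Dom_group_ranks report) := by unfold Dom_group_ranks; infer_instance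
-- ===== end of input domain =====

-- B is an alternative decomposition of the same O(n) task: parse all rows, group every rank
-- under its signature, then take min per bucket — instead of A's running minimum per key.

-- ===== PORT A =====
-- Literal transliteration of A: one fold over the rows, keeping the best (smallest) rank
-- seen so far for each truthy signature in an insertion-ordered dict.
def group_ranks (report : List (String × List (List (String × String)))) : List (String × Int) :=
  let rows := ((PySem.Dict.mk report).get? "ranking").getD []
  let best := rows.foldl (fun (d : PySem.Dict String Int) row =>
    let signature := ((PySem.Dict.mk row).get? "equivalence_signature").getD ""
    -- int(row.get("rank") or 0): none / "" is falsy → 0; otherwise int(s) (ValueError excluded by Pre_)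
    let rank : Int := match (PySem.Dict.mk row).get? "rank" with
      | none => 0
      | some s => if s = "" then 0 else (PySem.Int.ofStr? s).getD 0
    if signature ≠ "" ∧ (d.contains signature = false ∨ rank < d.getD signature 0) then
      d.insert signature rank
    else d) PySem.Dict.empty
  best.items

-- ===== PORT B =====
-- parse of one row: (str(row.get("equivalence_signature") or ""), int(row.get("rank") or 0))
def pvParse (row : List (String × String)) : String × Int :=
  (((PySem.Dict.mk row).get? "equivalence_signature").getD "",
   match (PySem.Dict.mk row).get? "rank" with
   | none => 0
   | some s => if s = "" then 0 else (PySem.Int.ofStr? s).getD 0)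

-- min(ranks); the buckets B builds are never empty, so the none branch is unreachable
def pvMin (rs : List Int) : Int := (PySem.List.min? rs (fun x => x)).getD 0

def group_ranks_alt (report : List (String × List (List (String × String)))) : List (String × Int) :=
  let parsed := (((PySem.Dict.mk report).get? "ranking").getD []).map pvParse
  let groups := parsed.foldl (fun (g : PySem.Dict String (List Int)) p =>
    if p.1 ≠ "" then g.insert p.1 (g.getD p.1 [] ++ [p.2]) else g) PySem.Dict.empty
  groups.items.map (fun q => (q.1, pvMin q.2))

-- ===== PRECONDITION & SPEC =====
-- Pre_ excludes exactly the inputs where Python A raises ValueError: a row whose "rank"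
-- value is a nonempty string that int() cannot parse.
def Pre_group_ranks (report : List (String × List (List (String × String)))) : Prop :=
  ((((PySem.Dict.mk report).get? "ranking").getD []).all (fun row =>
    match (PySem.Dict.mk row).get? "rank" with
    | none => true
    | some s => (s == "") || (PySem.Int.ofStr? s).isSome)) = true
instance (report : List (String × List (List (String × String)))) : Decidable (Pre_group_ranks report) := by unfold Pre_group_ranks; infer_instance

def pvWitness_group_ranks : (List (String × List (List (String × String)))) :=
  [("ranking", [[("equivalence_signature", "a"), ("rank", "2")],
                [("equivalence_signature", "b"), ("rank", "1")],
                [("equivalence_signature", "a"), ("rank", "1")]])]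

def Spec_group_ranks (report : List (String × List (List (String × String)))) (out : List (String × Int)) : Prop := out = group_ranks_alt report
instance (report : List (String × List (List (String × String)))) (out : List (String × Int)) : Decidable (Spec_group_ranks report out) := by unfold Spec_group_ranks; infer_instance

-- ===== CLAIM (what is proved, stated in full; the proofs are below) =====
def Claim_equal_group_ranks : Prop := ∀ (report : List (String × List (List (String × String)))), Dom_group_ranks report → Pre_group_ranks report → Spec_group_ranks report (group_ranks report)

-- ===== LEMMAS AND PROOFS =====

-- the value-level reduction applied to one bucket entry
def pvRed (q : String × List Int) : String × Int := (q.1, pvMin q.2)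

-- A's loop step / B's loop step, over an already-parsed (signature, rank) pair
def pvStepA (d : PySem.Dict String Int) (p : String × Int) : PySem.Dict String Int :=
  if p.1 ≠ "" ∧ (d.contains p.1 = false ∨ p.2 < d.getD p.1 0) then d.insert p.1 p.2 else d
def pvStepB (g : PySem.Dict String (List Int)) (p : String × Int) : PySem.Dict String (List Int) :=
  if p.1 ≠ "" then g.insert p.1 (g.getD p.1 [] ++ [p.2]) else g

def pvMapMin (g : PySem.Dict String (List Int)) : PySem.Dict String Int :=
  PySem.Dict.mk (g.items.map pvRed)

theorem pvMin_singleton (r : Int) : pvMin [r] = r := by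
  simp [pvMin, PySem.List.min?_id_cons]

theorem pvMin_append (b : List Int) (hb : b ≠ []) (r : Int) :
    pvMin (b ++ [r]) = min (pvMin b) r := by
  cases b with
  | nil => exact absurd rfl hb
  | cons x t => simp [pvMin, PySem.List.min?_id_cons, List.foldl_append]

theorem pvGet?_mk_map (l : List (String × List Int)) (s : String) :
    (PySem.Dict.mk (l.map pvRed)).get? s = ((PySem.Dict.mk l).get? s).map pvMin := by
  induction l with
  | nil => rfl
  | cons q t ih =>
    obtain ⟨k, b⟩ := q
    simp only [List.map_cons, pvRed, PySem.Dict.get?_mk_cons]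
    split <;> simp [ih]

theorem pvMapMin_get? (g : PySem.Dict String (List Int)) (s : String) :
    (pvMapMin g).get? s = (g.get? s).map pvMin := by
  obtain ⟨l⟩ := g
  exact pvGet?_mk_map l s

theorem pvMapMin_contains (g : PySem.Dict String (List Int)) (s : String) :
    (pvMapMin g).contains s = g.contains s := by
  obtain ⟨l⟩ := g
  induction l with
  | nil => rfl
  | cons q t ih => simp [pvMapMin, PySem.Dict.contains_mk, pvRed] at ih ⊢; rw [ih]

theorem pvStep_comm (g : PySem.Dict String (List Int)) (p : String × Int)
    (hnd : g.keys.Nodup) (hne : ∀ q ∈ g.items, q.2 ≠ []) :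
    pvStepA (pvMapMin g) p = pvMapMin (pvStepB g p) := by
  obtain ⟨sg, r⟩ := p
  by_cases hs : sg = ""
  · simp [pvStepA, pvStepB, hs]
  · by_cases hc : g.contains sg
    · -- key already present: A updates only if r beats the current minimum
      obtain ⟨b, hb⟩ : ∃ b, g.get? sg = some b := by
        have := PySem.Dict.contains_eq_isSome_get? g sg
        rw [hc] at this
        exact (Option.isSome_iff_exists.mp this.symm)
      have hbmem : (sg, b) ∈ g.items := PySem.Dict.mem_items_of_get?_eq_some g hb
      have hbne : b ≠ [] := hne _ hbmem
      have hgD : g.getD sg [] = b := by rw [PySem.Dict.getD_eq_get?_getD, hb]; rfl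
      have hmD : (pvMapMin g).getD sg 0 = pvMin b := by
        rw [PySem.Dict.getD_eq_get?_getD, pvMapMin_get?, hb]; rfl
      have hmc : (pvMapMin g).contains sg = true := by rw [pvMapMin_contains]; exact hc
      have hBitems : (pvStepB g (sg, r)).items
          = g.items.map (fun q => if (q.1 == sg) = true then (sg, b ++ [r]) else q) := by
        simp only [pvStepB, hs, ite_not, hgD]
        simpa using PySem.Dict.items_insert_of_contains g (b ++ [r]) hc
      have hmap : (pvMapMin (pvStepB g (sg, r))).items
          = (g.items.map pvRed).map
              (fun q => if (q.1 == sg) = true then (sg, min (pvMin b) r) else q) := by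
        rw [pvMapMin, hBitems, List.map_map, List.map_map]
        refine List.map_congr_left (fun q hq => ?_)
        by_cases h1 : q.1 = sg
        · simp [pvRed, Function.comp, h1, pvMin_append b hbne r]
        · simp [pvRed, Function.comp, h1]
      by_cases hlt : r < pvMin b
      · -- A inserts; the mapped replacement writes the same value min(pvMin b) r = r
        have : pvStepA (pvMapMin g) (sg, r) = (pvMapMin g).insert sg r := by
          simp [pvStepA, hs, hmc, hmD, hlt]
        apply PySem.Dict.ext
        rw [this, hmap, PySem.Dict.items_insert_of_contains _ r hmc, pvMapMin,
            min_eq_right (le_of_lt hlt)]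
      · -- A keeps its dict; the replacement is the identity on the unique sg entry
        have hA : pvStepA (pvMapMin g) (sg, r) = pvMapMin g := by
          simp [pvStepA, hs, hmc, hmD, hlt]
        apply PySem.Dict.ext
        rw [hA, hmap, min_eq_left (le_of_not_gt hlt), pvMapMin, List.map_map]
        show List.map pvRed g.items = _
        symm
        refine List.map_congr_left (fun q hq => ?_)
        obtain ⟨qk, qv⟩ := q
        by_cases h1 : qk = sg
        · subst h1
          have hq2 : g.get? qk = some qv := PySem.Dict.get?_of_mem_items g hq hnd
          have : qv = b := by rw [hq2] at hb; exact Option.some.inj hb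
          subst this
          simp [pvRed, Function.comp]
        · simp [pvRed, Function.comp, h1]
    · -- fresh key: both sides append one entry
      have hcf : g.contains sg = false := by simpa using hc
      have hnc : (pvMapMin g).contains sg = false := by rw [pvMapMin_contains]; exact hcf
      have hA : pvStepA (pvMapMin g) (sg, r) = (pvMapMin g).insert sg r := by
        simp [pvStepA, hs, hnc]
      have hB : pvStepB g (sg, r) = g.insert sg [r] := by
        simp [pvStepB, hs, PySem.Dict.getD_of_not_contains g [] hcf]
      apply PySem.Dict.ext
      rw [hA, hB, PySem.Dict.items_insert_of_not_contains _ r hnc]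
      simp [pvMapMin, PySem.Dict.items_insert_of_not_contains _ [r] hcf, pvRed, pvMin_singleton]

theorem pvBridge (l : List (String × Int)) (g : PySem.Dict String (List Int))
    (hnd : g.keys.Nodup) (hne : ∀ q ∈ g.items, q.2 ≠ []) :
    l.foldl pvStepA (pvMapMin g) = pvMapMin (l.foldl pvStepB g) := by
  induction l generalizing g with
  | nil => rfl
  | cons p t ih =>
    have hnd' : (pvStepB g p).keys.Nodup := by
      unfold pvStepB; split
      · exact PySem.Dict.nodup_keys_insert g _ _ hnd
      · exact hnd
    have hne' : ∀ q ∈ (pvStepB g p).items, q.2 ≠ [] := by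
      intro q hq
      unfold pvStepB at hq; split at hq
      · rcases (PySem.Dict.mem_items_insert ..).mp hq with h | h
        · subst h; simp
        · exact hne _ h.1
      · exact hne _ hq
    simp only [List.foldl_cons, pvStep_comm g p hnd hne]
    exact ih (pvStepB g p) hnd' hne'

-- ===== VERDICT (by name: the statement is the Claim_ definition above) =====
theorem pvMain (rows : List (List (String × String))) :
    (rows.foldl (fun (d : PySem.Dict String Int) row =>
      let signature := ((PySem.Dict.mk row).get? "equivalence_signature").getD ""
      let rank : Int := match (PySem.Dict.mk row).get? "rank" with
        | none => 0
        | some s => if s = "" then 0 else (PySem.Int.ofStr? s).getD 0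
      if signature ≠ "" ∧ (d.contains signature = false ∨ rank < d.getD signature 0) then
        d.insert signature rank
      else d) PySem.Dict.empty).items
    = ((rows.map pvParse).foldl (fun (g : PySem.Dict String (List Int)) p =>
        if p.1 ≠ "" then g.insert p.1 (g.getD p.1 [] ++ [p.2]) else g)
        PySem.Dict.empty).items.map (fun q => (q.1, pvMin q.2)) := by
  show (rows.foldl (fun d row => pvStepA d (pvParse row)) (pvMapMin PySem.Dict.empty)).items
      = ((rows.map pvParse).foldl pvStepB PySem.Dict.empty).items.map pvRed
  rw [← List.foldl_map,
      pvBridge _ PySem.Dict.empty (by simp [PySem.Dict.keys_empty])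
        (by intro q hq; simp only [show PySem.Dict.empty.items = ([] : List (String × List Int)) from rfl] at hq; cases hq)]
  rfl

theorem group_ranks_spec : Claim_equal_group_ranks := by
  intro report _ _
  unfold Spec_group_ranks group_ranks group_ranks_alt
  exact pvMain _
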